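-- pv_equiv track=rewrite | github.com/Andre-Satorres/mc102-labs | lab14.py | atingidos_por_fake_news
-- ===== SOURCE A (Python) =====
-- def atingidos_por_fake_news(pessoas, compartilhador):
--     # Avaliar um caso base --> não compartilhou com ninguem
--     if pessoas[compartilhador][0] == 0:  # Entao ele nao compartilhou na FN com ninguem (fluxo acaba nele)
--         return [compartilhador]  # retorno uma lista só com o compartilhador
--
--     atingidos = [compartilhador]  # vai armazenar todos os atingidos a partir de um usuario especifico
--
--     # Se chegou aqui então é gerador ou compartilhador (pessoas[compartilhador][0] == 1 ou 2)
--     for i in range(len(pessoas[compartilhador][1])):  # percorrer lista de amigos dele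
--         # obter a lista de usuarios atingidos a partir do usuario atual
--         for pessoa in atingidos_por_fake_news(pessoas, pessoas[compartilhador][1][i]):
--             atingidos.append(pessoa)  # adiciono os atingidos a partir do usuario atual
--
--     return atingidos  # retorno a lista com todos os atingidos a partir de um usuario especifico
-- ===== SOURCE B (Python) =====
-- def atingidos_por_fake_news(pessoas, compartilhador):
--     # Iterative DFS with an explicit stack instead of recursion.
--     stack = [compartilhador]
--     atingidos = []
--     while stack:
--         node = stack.pop()
--         atingidos.append(node)
--         if pessoas[node][0] != 0:
--             # push friends reversed so they are visited left-to-right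
--             stack.extend(reversed(pessoas[node][1]))
--     return atingidos
-- ===== Notes on version B (the rewrite author's own statement) =====
-- stated objective: alternative
-- what changed: Replaces the recursive DFS with an iterative pre-order DFS driven by an explicit list-as-stack (children pushed reversed so the left-to-right order is kept), removing recursion entirely.
import Mathlib
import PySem

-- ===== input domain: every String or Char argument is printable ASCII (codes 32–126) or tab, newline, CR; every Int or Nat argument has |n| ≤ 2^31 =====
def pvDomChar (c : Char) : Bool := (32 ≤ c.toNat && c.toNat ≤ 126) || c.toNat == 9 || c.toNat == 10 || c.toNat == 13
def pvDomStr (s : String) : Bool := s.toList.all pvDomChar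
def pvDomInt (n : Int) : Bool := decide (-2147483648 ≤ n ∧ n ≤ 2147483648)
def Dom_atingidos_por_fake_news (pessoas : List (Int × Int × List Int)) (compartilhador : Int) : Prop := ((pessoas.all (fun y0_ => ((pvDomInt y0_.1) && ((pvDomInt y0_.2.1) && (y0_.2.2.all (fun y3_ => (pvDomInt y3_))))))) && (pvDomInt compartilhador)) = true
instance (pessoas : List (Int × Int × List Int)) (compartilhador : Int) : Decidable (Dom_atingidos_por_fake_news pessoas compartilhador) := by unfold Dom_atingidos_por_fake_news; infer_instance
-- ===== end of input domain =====

-- B replaces A's recursive DFS by an iterative pre-order DFS over an explicit stack (same values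
-- wherever A returns). Both Lean ports are totalized with fuel that the proof shows is never
-- exhausted inside Pre_, which is exactly A's return domain (no missing key and no repeated node
-- along any sharing chain).


-- ===== PORT A =====
-- pessoas is a Python dict {id: (flag, friends)}; here it is the association list in insertion
-- order, so pessoas[c] is first-match lookup (none = KeyError).
def pvLookup (pessoas : List (Int × Int × List Int)) (c : Int) : Option (Int × List Int) :=
  (pessoas.find? (fun p => p.1 == c)).map (fun p => p.2)

-- A's recursion, totalized with fuel (fuel = 0 and KeyError return junk []; both are unreachable
-- inside Pre_, where the proof shows fuel pessoas.length + 2 suffices and every lookup succeeds).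
-- 'for i in range(len(friends)): for pessoa in rec(friends[i]): atingidos.append(pessoa)'
-- iterates friends left to right appending each recursive result: foldl with acc ++ rec f.
def pvAFuel (pessoas : List (Int × Int × List Int)) : Nat → Int → List Int
  | 0, _ => []
  | n + 1, c =>
    match pvLookup pessoas c with
    | none => []                                   -- KeyError in Python
    | some e =>
      if e.1 = 0 then [c]
      else e.2.foldl (fun acc f => acc ++ pvAFuel pessoas n f) [c]

def atingidos_por_fake_news (pessoas : List (Int × Int × List Int)) (compartilhador : Int) : List Int :=
  pvAFuel pessoas (pessoas.length + 2) compartilhador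

-- ===== PORT B =====
-- B's explicit stack. Python keeps the stack top at the END (pop/extend(reversed(friends)));
-- here the stack is kept top-first, so that step is friends ++ rest. Fuel bounds the number of
-- loop iterations (= nodes emitted); pvFuelB is shown sufficient inside Pre_.
def pvMaxF (pessoas : List (Int × Int × List Int)) : Nat :=
  pessoas.foldl (fun m p => max m p.2.2.length) 0

def pvFuelB (pessoas : List (Int × Int × List Int)) : Nat :=
  (pvMaxF pessoas + 2) ^ (pessoas.length + 2)

def pvBLoop (pessoas : List (Int × Int × List Int)) : Nat → List Int → List Int → List Int
  | 0, _, acc => acc                               -- fuel exhausted (unreachable inside Pre_)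
  | _ + 1, [], acc => acc
  | n + 1, node :: rest, acc =>
    match pvLookup pessoas node with
    | none => acc ++ [node]                        -- KeyError in Python (after the append)
    | some e =>
      if e.1 = 0 then pvBLoop pessoas n rest (acc ++ [node])
      else pvBLoop pessoas n (e.2 ++ rest) (acc ++ [node])

def atingidos_por_fake_news_alt (pessoas : List (Int × Int × List Int)) (compartilhador : Int) : List Int :=
  pvBLoop pessoas (pvFuelB pessoas) [compartilhador] []

-- ===== PRECONDITION & SPEC =====
-- position of key c in the dict (first match; = length when the key is missing)
def pvIdx (pessoas : List (Int × Int × List Int)) (c : Int) : Nat :=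
  pessoas.findIdx (fun p => p.1 == c)

-- friend edges of the entry at position i, as positions (empty for a non-sharing or missing entry)
def pvSuccs (pessoas : List (Int × Int × List Int)) (i : Nat) : List Nat :=
  match pessoas[i]? with
  | none => []
  | some p => if p.2.1 = 0 then [] else p.2.2.map (pvIdx pessoas)

def pvStep (pessoas : List (Int × Int × List Int)) (S : List Nat) : List Nat :=
  (S ++ S.flatMap (pvSuccs pessoas)).dedup

def pvClosure (pessoas : List (Int × Int × List Int)) : Nat → List Nat → List Nat
  | 0, S => S
  | k + 1, S => pvClosure pessoas k (pvStep pessoas S)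

def pvK (pessoas : List (Int × Int × List Int)) : Nat := pessoas.length + 2

-- all positions reachable from position i along friend edges (pvK iterations reach the fixpoint)
def pvReachFrom (pessoas : List (Int × Int × List Int)) (i : Nat) : List Nat :=
  pvClosure pessoas (pvK pessoas) [i]

-- Pre_ is exactly the set of inputs on which the Python A RETURNS: the shared key exists, every
-- friend reachable along sharing edges is a key of the dict (else A raises KeyError), and no
-- reachable node can reach itself (else A recurses forever / raises RecursionError). It is a
-- property of the input graph (reachability along the friend-edge relation), not a replay of A.
def Pre_atingidos_por_fake_news (pessoas : List (Int × Int × List Int)) (compartilhador : Int) : Prop :=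
  pvIdx pessoas compartilhador < pessoas.length ∧
  ∀ i ∈ pvReachFrom pessoas (pvIdx pessoas compartilhador),
    (∀ j ∈ pvSuccs pessoas i, j < pessoas.length) ∧
    i ∉ pvClosure pessoas (pvK pessoas) (pvSuccs pessoas i)
instance (pessoas : List (Int × Int × List Int)) (compartilhador : Int) : Decidable (Pre_atingidos_por_fake_news pessoas compartilhador) := by unfold Pre_atingidos_por_fake_news; infer_instance
def pvWitness_atingidos_por_fake_news : (List (Int × Int × List Int)) × Int := ([(0, 2, [1, 2]), (1, 1, [2]), (2, 0, [])], 0)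

def Spec_atingidos_por_fake_news (pessoas : List (Int × Int × List Int)) (compartilhador : Int) (out : List Int) : Prop := out = atingidos_por_fake_news_alt pessoas compartilhador
instance (pessoas : List (Int × Int × List Int)) (compartilhador : Int) (out : List Int) : Decidable (Spec_atingidos_por_fake_news pessoas compartilhador out) := by unfold Spec_atingidos_por_fake_news; infer_instance

-- ===== CLAIM (what is proved, stated in full; the proofs are below) =====
def Claim_equal_atingidos_por_fake_news : Prop := ∀ (pessoas : List (Int × Int × List Int)) (compartilhador : Int), Dom_atingidos_por_fake_news pessoas compartilhador → Pre_atingidos_por_fake_news pessoas compartilhador → Spec_atingidos_por_fake_news pessoas compartilhador (atingidos_por_fake_news pessoas compartilhador)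

-- ===== LEMMAS AND PROOFS =====

-- `atingidos_por_fake_news pessoas` is the canonical DFS value; abbreviation used by the lemmas
def pvDfs (pessoas : List (Int × Int × List Int)) (c : Int) : List Int :=
  atingidos_por_fake_news pessoas c

-- rank of a position: number of distinct positions reachable from it (proof-only)
def pvR (pessoas : List (Int × Int × List Int)) (i : Nat) : Nat :=
  (pvReachFrom pessoas i).toFinset.card

-- lookup / findIdx bookkeeping
theorem pvLookup_of_idx_lt (pessoas : List (Int × Int × List Int)) (c : Int)
    (h : pvIdx pessoas c < pessoas.length) :
    pvLookup pessoas c = some (pessoas[pvIdx pessoas c]'h).2 := by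
  induction pessoas with
  | nil => simp at h
  | cons a l ih =>
    by_cases hp : a.1 == c
    · simp [pvLookup, pvIdx, List.findIdx_cons, hp]
    · have h' : pvIdx l c < l.length := by
        have : pvIdx (a :: l) c = pvIdx l c + 1 := by simp [pvIdx, List.findIdx_cons, hp]
        simpa [this] using h
      have := ih h'
      simp only [pvLookup, pvIdx, List.find?_cons, List.findIdx_cons, hp] at *
      simpa using this

theorem pvIdx_le (pessoas : List (Int × Int × List Int)) (c : Int) :
    pvIdx pessoas c ≤ pessoas.length :=
  List.findIdx_le_length

-- membership in one expansion step
theorem pvMem_step (pessoas : List (Int × Int × List Int)) (S : List Nat) (x : Nat) :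
    x ∈ pvStep pessoas S ↔ x ∈ S ∨ ∃ y ∈ S, x ∈ pvSuccs pessoas y := by
  simp [pvStep, List.mem_dedup, List.mem_append, List.mem_flatMap]

theorem pvSubset_step (pessoas : List (Int × Int × List Int)) (S : List Nat) :
    ∀ x ∈ S, x ∈ pvStep pessoas S := by
  intro x hx; exact (pvMem_step pessoas S x).mpr (Or.inl hx)

theorem pvStep_mono (pessoas : List (Int × Int × List Int)) (S T : List Nat)
    (h : ∀ x ∈ S, x ∈ T) : ∀ x ∈ pvStep pessoas S, x ∈ pvStep pessoas T := by
  intro x hx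
  rcases (pvMem_step pessoas S x).mp hx with hx | ⟨y, hy, hxy⟩
  · exact (pvMem_step pessoas T x).mpr (Or.inl (h x hx))
  · exact (pvMem_step pessoas T x).mpr (Or.inr ⟨y, h y hy, hxy⟩)

theorem pvSubset_closure (pessoas : List (Int × Int × List Int)) :
    ∀ (k : Nat) (S : List Nat), ∀ x ∈ S, x ∈ pvClosure pessoas k S := by
  intro k
  induction k with
  | zero => intro S x hx; simpa [pvClosure] using hx
  | succ k ih =>
    intro S x hx
    exact ih (pvStep pessoas S) x (pvSubset_step pessoas S x hx)

-- a step-closed superset absorbs the whole closure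
theorem pvClosure_absorb (pessoas : List (Int × Int × List Int)) (T : List Nat)
    (hT : ∀ x ∈ pvStep pessoas T, x ∈ T) :
    ∀ (k : Nat) (S : List Nat), (∀ x ∈ S, x ∈ T) →
      ∀ x ∈ pvClosure pessoas k S, x ∈ T := by
  intro k
  induction k with
  | zero => intro S h x hx; exact h x (by simpa [pvClosure] using hx)
  | succ k ih =>
    intro S h x hx
    refine ih (pvStep pessoas S) (fun y hy => ?_) x hx
    exact hT y (pvStep_mono pessoas S T h y hy)

theorem pvSuccs_le (pessoas : List (Int × Int × List Int)) (i : Nat) :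
    ∀ j ∈ pvSuccs pessoas i, j ≤ pessoas.length := by
  intro j hj
  unfold pvSuccs at hj
  cases h : pessoas[i]? with
  | none => rw [h] at hj; simp at hj
  | some p =>
    rw [h] at hj
    by_cases hz : p.2.1 = 0
    · simp [hz] at hj
    · simp only [hz, if_false, List.mem_map] at hj
      obtain ⟨f, _, rfl⟩ := hj
      exact pvIdx_le pessoas f

theorem pvStep_le (pessoas : List (Int × Int × List Int)) (S : List Nat)
    (h : ∀ x ∈ S, x ≤ pessoas.length) :
    ∀ x ∈ pvStep pessoas S, x ≤ pessoas.length := by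
  intro x hx
  rcases (pvMem_step pessoas S x).mp hx with hx | ⟨y, _, hxy⟩
  · exact h x hx
  · exact pvSuccs_le pessoas y x hxy

theorem pvClosure_le (pessoas : List (Int × Int × List Int)) :
    ∀ (k : Nat) (S : List Nat), (∀ x ∈ S, x ≤ pessoas.length) →
      ∀ x ∈ pvClosure pessoas k S, x ≤ pessoas.length := by
  intro k
  induction k with
  | zero => intro S h x hx; exact h x (by simpa [pvClosure] using hx)
  | succ k ih => intro S h x hx; exact ih _ (pvStep_le pessoas S h) x hx

theorem pvClosure_card_le (pessoas : List (Int × Int × List Int)) (k : Nat) (S : List Nat)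
    (h : ∀ x ∈ S, x ≤ pessoas.length) :
    (pvClosure pessoas k S).toFinset.card ≤ pessoas.length + 1 := by
  have hsub : (pvClosure pessoas k S).toFinset ⊆ Finset.range (pessoas.length + 1) := by
    intro x hx
    rw [List.mem_toFinset] at hx
    exact Finset.mem_range.mpr (Nat.lt_succ_of_le (pvClosure_le pessoas k S h x hx))
  simpa using Finset.card_le_card hsub

-- after pvK iterations the closure is step-closed (pigeonhole on ≤ length+1 positions)
theorem pvClosure_aux (pessoas : List (Int × Int × List Int)) :
    ∀ (k : Nat) (S : List Nat), (∀ x ∈ S, x ≤ pessoas.length) →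
      (∀ x ∈ pvStep pessoas (pvClosure pessoas k S), x ∈ pvClosure pessoas k S) ∨
      S.toFinset.card + k ≤ (pvClosure pessoas k S).toFinset.card := by
  intro k
  induction k with
  | zero => intro S _; right; simp [pvClosure]
  | succ k ih =>
    intro S hb
    by_cases hsub : ∀ x ∈ pvStep pessoas S, x ∈ S
    · left
      have hstepc : ∀ x ∈ pvStep pessoas (pvStep pessoas S), x ∈ pvStep pessoas S :=
        pvStep_mono pessoas (pvStep pessoas S) S hsub
      have hcl : ∀ x ∈ pvClosure pessoas k (pvStep pessoas S), x ∈ pvStep pessoas S :=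
        pvClosure_absorb pessoas (pvStep pessoas S) hstepc k (pvStep pessoas S) (fun x hx => hx)
      intro x hx
      show x ∈ pvClosure pessoas k (pvStep pessoas S)
      have : x ∈ pvStep pessoas (pvStep pessoas S) :=
        pvStep_mono pessoas _ _ hcl x hx
      exact pvSubset_closure pessoas k (pvStep pessoas S) x (hstepc x this)
    · rcases ih (pvStep pessoas S) (pvStep_le pessoas S hb) with hL | hR
      · left; exact hL
      · right
        push Not at hsub
        obtain ⟨x, hx, hxn⟩ := hsub
        have hss : S.toFinset ⊂ (pvStep pessoas S).toFinset := by
          constructor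
          · intro y hy
            rw [List.mem_toFinset] at *
            exact pvSubset_step pessoas S y hy
          · intro hcon
            exact hxn (by simpa using hcon (List.mem_toFinset.mpr hx))
        have := Finset.card_lt_card hss
        show S.toFinset.card + (k + 1) ≤ (pvClosure pessoas k (pvStep pessoas S)).toFinset.card
        omega

theorem pvClosure_closed (pessoas : List (Int × Int × List Int)) (S : List Nat)
    (h : ∀ x ∈ S, x ≤ pessoas.length) :
    ∀ x ∈ pvStep pessoas (pvClosure pessoas (pvK pessoas) S),
      x ∈ pvClosure pessoas (pvK pessoas) S := by
  rcases pvClosure_aux pessoas (pvK pessoas) S h with hL | hR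
  · exact hL
  · exfalso
    have hc := pvClosure_card_le pessoas (pvK pessoas) S h
    have hK : pvK pessoas = pessoas.length + 2 := rfl
    omega

theorem pvR_pos (pessoas : List (Int × Int × List Int)) (i : Nat) : 1 ≤ pvR pessoas i := by
  have : i ∈ pvReachFrom pessoas i := pvSubset_closure pessoas _ [i] i (by simp)
  have : i ∈ (pvReachFrom pessoas i).toFinset := List.mem_toFinset.mpr this
  exact Finset.card_pos.mpr ⟨i, this⟩

theorem pvR_le (pessoas : List (Int × Int × List Int)) (i : Nat) (h : i ≤ pessoas.length) :
    pvR pessoas i ≤ pessoas.length + 1 :=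
  pvClosure_card_le pessoas (pvK pessoas) [i] (by simpa using h)

-- successors land in the one-step expansion of [i], hence in pvReachFrom i
theorem pvSucc_mem_reach (pessoas : List (Int × Int × List Int)) (i j : Nat)
    (hj : j ∈ pvSuccs pessoas i) : j ∈ pvReachFrom pessoas i := by
  have h1 : j ∈ pvStep pessoas [i] :=
    (pvMem_step pessoas [i] j).mpr (Or.inr ⟨i, by simp, hj⟩)
  show j ∈ pvClosure pessoas (pessoas.length + 2) [i]
  show j ∈ pvClosure pessoas (pessoas.length + 1 + 1) [i]
  exact pvSubset_closure pessoas (pessoas.length + 1) (pvStep pessoas [i]) j h1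

-- an edge strictly decreases the rank at an acyclic node
theorem pvR_lt (pessoas : List (Int × Int × List Int)) (i j : Nat)
    (hi : i ≤ pessoas.length) (hj : j ∈ pvSuccs pessoas i)
    (hac : i ∉ pvClosure pessoas (pvK pessoas) (pvSuccs pessoas i)) :
    pvR pessoas j < pvR pessoas i := by
  have hclI : ∀ x ∈ pvStep pessoas (pvReachFrom pessoas i), x ∈ pvReachFrom pessoas i :=
    pvClosure_closed pessoas [i] (by simpa using hi)
  have hjI : j ∈ pvReachFrom pessoas i := pvSucc_mem_reach pessoas i j hj
  have hsubJI : ∀ x ∈ pvReachFrom pessoas j, x ∈ pvReachFrom pessoas i :=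
    pvClosure_absorb pessoas (pvReachFrom pessoas i) hclI (pvK pessoas) [j] (by simpa using hjI)
  have hclS : ∀ x ∈ pvStep pessoas (pvClosure pessoas (pvK pessoas) (pvSuccs pessoas i)),
      x ∈ pvClosure pessoas (pvK pessoas) (pvSuccs pessoas i) :=
    pvClosure_closed pessoas (pvSuccs pessoas i) (pvSuccs_le pessoas i)
  have hjS : j ∈ pvClosure pessoas (pvK pessoas) (pvSuccs pessoas i) :=
    pvSubset_closure pessoas _ _ j hj
  have hsubJS : ∀ x ∈ pvReachFrom pessoas j,
      x ∈ pvClosure pessoas (pvK pessoas) (pvSuccs pessoas i) :=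
    pvClosure_absorb pessoas _ hclS (pvK pessoas) [j] (by simpa using hjS)
  have hiI : i ∈ pvReachFrom pessoas i := pvSubset_closure pessoas _ [i] i (by simp)
  have hiJ : i ∉ pvReachFrom pessoas j := fun hcon => hac (hsubJS i hcon)
  apply Finset.card_lt_card
  constructor
  · intro x hx
    rw [List.mem_toFinset] at *
    exact hsubJI x hx
  · intro hcon
    exact hiJ (List.mem_toFinset.mp (hcon (List.mem_toFinset.mpr hiI)))

-- the successor positions of a sharing node are exactly the friend positions
theorem pvSuccs_eq (pessoas : List (Int × Int × List Int)) (c : Int) (e : Int × List Int)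
    (h : pvIdx pessoas c < pessoas.length)
    (he : pvLookup pessoas c = some e) (hnz : e.1 ≠ 0) :
    pvSuccs pessoas (pvIdx pessoas c) = e.2.map (pvIdx pessoas) := by
  have hv := pvLookup_of_idx_lt pessoas c h
  rw [he] at hv
  have hve : (pessoas[pvIdx pessoas c]'h).2 = e := (Option.some.injEq _ _).mp hv.symm
  unfold pvSuccs
  rw [List.getElem?_eq_getElem h]
  simp [hve, hnz]

-- friend step inside a good set RS (closed, in-bounds, acyclic)
theorem pvFriend_step (pessoas : List (Int × Int × List Int)) (RS : List Nat)
    (hcl : ∀ i ∈ RS, ∀ j ∈ pvSuccs pessoas i, j ∈ RS)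
    (hlt : ∀ i ∈ RS, ∀ j ∈ pvSuccs pessoas i, j < pessoas.length)
    (hac : ∀ i ∈ RS, i ∉ pvClosure pessoas (pvK pessoas) (pvSuccs pessoas i))
    (c : Int) (hm : pvIdx pessoas c ∈ RS) (hg : pvIdx pessoas c < pessoas.length)
    (e : Int × List Int) (he : pvLookup pessoas c = some e) (hnz : e.1 ≠ 0) :
    ∀ f ∈ e.2, pvIdx pessoas f ∈ RS ∧ pvIdx pessoas f < pessoas.length ∧
      pvR pessoas (pvIdx pessoas f) < pvR pessoas (pvIdx pessoas c) := by
  intro f hf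
  have hjs : pvIdx pessoas f ∈ pvSuccs pessoas (pvIdx pessoas c) := by
    rw [pvSuccs_eq pessoas c e hg he hnz]
    exact List.mem_map.mpr ⟨f, hf, rfl⟩
  exact ⟨hcl _ hm _ hjs, hlt _ hm _ hjs,
    pvR_lt pessoas _ _ (Nat.le_of_lt hg) hjs (hac _ hm)⟩

theorem pvFoldlAppCongr (l : List Int) (g g' : Int → List Int) (a : List Int)
    (h : ∀ f ∈ l, g f = g' f) :
    l.foldl (fun acc f => acc ++ g f) a = l.foldl (fun acc f => acc ++ g' f) a := by
  induction l generalizing a with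
  | nil => rfl
  | cons x t ih =>
    simp only [List.foldl_cons]
    rw [h x (by simp), ih _ (fun f hf => h f (by simp [hf]))]

-- fuel stability: above the rank the value of pvAFuel no longer depends on the fuel
theorem pvAFuel_stable (pessoas : List (Int × Int × List Int)) (RS : List Nat)
    (hcl : ∀ i ∈ RS, ∀ j ∈ pvSuccs pessoas i, j ∈ RS)
    (hlt : ∀ i ∈ RS, ∀ j ∈ pvSuccs pessoas i, j < pessoas.length)
    (hac : ∀ i ∈ RS, i ∉ pvClosure pessoas (pvK pessoas) (pvSuccs pessoas i)) :
    ∀ n c, pvIdx pessoas c ∈ RS → pvIdx pessoas c < pessoas.length →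
      pvR pessoas (pvIdx pessoas c) < n →
      pvAFuel pessoas n c = pvAFuel pessoas (n + 1) c := by
  intro n
  induction n using Nat.strong_induction_on with
  | _ n ih =>
    intro c hm hg hn
    obtain ⟨m, rfl⟩ : ∃ m, n = m + 1 := ⟨n - 1, by have := pvR_pos pessoas (pvIdx pessoas c); omega⟩
    show pvAFuel pessoas (m + 1) c = pvAFuel pessoas (m + 1 + 1) c
    simp only [pvAFuel]
    cases hl : pvLookup pessoas c with
    | none => rfl
    | some e =>
      by_cases hz : e.1 = 0
      · simp [hz]
      · simp only [hz, if_false]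
        apply pvFoldlAppCongr
        intro f hf
        obtain ⟨hfm, hfl, hfr⟩ := pvFriend_step pessoas RS hcl hlt hac c hm hg e hl hz f hf
        exact ih m (by omega) f hfm hfl (by omega)

theorem pvAFuel_eq_dfs (pessoas : List (Int × Int × List Int)) (RS : List Nat)
    (hcl : ∀ i ∈ RS, ∀ j ∈ pvSuccs pessoas i, j ∈ RS)
    (hlt : ∀ i ∈ RS, ∀ j ∈ pvSuccs pessoas i, j < pessoas.length)
    (hac : ∀ i ∈ RS, i ∉ pvClosure pessoas (pvK pessoas) (pvSuccs pessoas i))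
    (n : Nat) (c : Int) (hm : pvIdx pessoas c ∈ RS) (hg : pvIdx pessoas c < pessoas.length)
    (hn : pvR pessoas (pvIdx pessoas c) < n) :
    pvAFuel pessoas n c = pvDfs pessoas c := by
  have key : ∀ k, pvR pessoas (pvIdx pessoas c) + 1 ≤ k →
      pvAFuel pessoas k c = pvAFuel pessoas (pvR pessoas (pvIdx pessoas c) + 1) c := by
    intro k hk
    induction k, hk using Nat.le_induction with
    | base => rfl
    | succ k hk ih =>
      rw [← pvAFuel_stable pessoas RS hcl hlt hac k c hm hg (by omega), ih]
  have h1 := key n (by omega)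
  have h2 := key (pessoas.length + 2) (by have := pvR_le pessoas (pvIdx pessoas c) (Nat.le_of_lt hg); omega)
  unfold pvDfs atingidos_por_fake_news
  rw [h1, ← h2]

theorem pvAFuel_succ (pessoas : List (Int × Int × List Int)) (n : Nat) (c : Int) :
    pvAFuel pessoas (n + 1) c
      = match pvLookup pessoas c with
        | none => []
        | some e =>
          if e.1 = 0 then [c]
          else e.2.foldl (fun acc f => acc ++ pvAFuel pessoas n f) [c] := rfl

-- the two unfoldings of the canonical DFS value
theorem pvDfs_zero (pessoas : List (Int × Int × List Int)) (c : Int) (e : Int × List Int)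
    (he : pvLookup pessoas c = some e) (hz : e.1 = 0) : pvDfs pessoas c = [c] := by
  simp [pvDfs, atingidos_por_fake_news, pvAFuel, he, hz]

theorem pvDfs_cons (pessoas : List (Int × Int × List Int)) (RS : List Nat)
    (hcl : ∀ i ∈ RS, ∀ j ∈ pvSuccs pessoas i, j ∈ RS)
    (hlt : ∀ i ∈ RS, ∀ j ∈ pvSuccs pessoas i, j < pessoas.length)
    (hac : ∀ i ∈ RS, i ∉ pvClosure pessoas (pvK pessoas) (pvSuccs pessoas i))
    (c : Int) (hm : pvIdx pessoas c ∈ RS) (hg : pvIdx pessoas c < pessoas.length)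
    (e : Int × List Int) (he : pvLookup pessoas c = some e) (hnz : e.1 ≠ 0) :
    pvDfs pessoas c = c :: e.2.flatMap (pvDfs pessoas) := by
  have step := pvFriend_step pessoas RS hcl hlt hac c hm hg e he hnz
  have hunf : pvDfs pessoas c
      = e.2.foldl (fun acc f => acc ++ pvAFuel pessoas (pessoas.length + 1) f) [c] := by
    show pvAFuel pessoas (pessoas.length + 1 + 1) c = _
    rw [pvAFuel_succ, he]
    show (if e.1 = 0 then [c]
      else e.2.foldl (fun acc f => acc ++ pvAFuel pessoas (pessoas.length + 1) f) [c]) = _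
    rw [if_neg hnz]
  rw [hunf]
  rw [pvFoldlAppCongr e.2 _ (pvDfs pessoas) [c]
      (fun f hf => pvAFuel_eq_dfs pessoas RS hcl hlt hac (pessoas.length + 1) f
        (step f hf).1 (step f hf).2.1 (by
          have h1 := (step f hf).2.2
          have h2 := pvR_le pessoas (pvIdx pessoas c) (Nat.le_of_lt hg)
          omega))]
  rw [PySem.List.foldl_append_eq_flatMap]
  rfl

-- every friend list is bounded by pvMaxF
theorem pvMaxF_bound (pessoas : List (Int × Int × List Int)) (p : Int × Int × List Int)
    (hp : p ∈ pessoas) : p.2.2.length ≤ pvMaxF pessoas := by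
  have key : ∀ (l : List (Int × Int × List Int)) (a : Nat), p ∈ l →
      p.2.2.length ≤ l.foldl (fun m q => max m q.2.2.length) a := by
    intro l
    induction l with
    | nil => intro a hm; simp at hm
    | cons b t ih =>
      intro a hm
      rcases List.mem_cons.mp hm with h | h
      · subst h
        have mono : ∀ (t : List (Int × Int × List Int)) (x y : Nat), x ≤ y →
            x ≤ t.foldl (fun m q => max m q.2.2.length) y := by
          intro t
          induction t with
          | nil => intro x y h; simpa using h
          | cons u v ihv => intro x y h; exact ihv x _ (le_trans h (Nat.le_max_left _ _))
        exact mono t _ _ (Nat.le_max_right _ _)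
      · exact ih _ h
  exact key pessoas 0 hp

-- size bound: the DFS output fits under (maxF+2)^rank
theorem pvDfs_len_bound (pessoas : List (Int × Int × List Int)) (RS : List Nat)
    (hcl : ∀ i ∈ RS, ∀ j ∈ pvSuccs pessoas i, j ∈ RS)
    (hlt : ∀ i ∈ RS, ∀ j ∈ pvSuccs pessoas i, j < pessoas.length)
    (hac : ∀ i ∈ RS, i ∉ pvClosure pessoas (pvK pessoas) (pvSuccs pessoas i)) :
    ∀ c, pvIdx pessoas c ∈ RS → pvIdx pessoas c < pessoas.length →
      (pvDfs pessoas c).length ≤ (pvMaxF pessoas + 2) ^ (pvR pessoas (pvIdx pessoas c)) := by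
  have main : ∀ d c, pvIdx pessoas c ∈ RS → pvIdx pessoas c < pessoas.length →
      pvR pessoas (pvIdx pessoas c) ≤ d →
      (pvDfs pessoas c).length ≤ (pvMaxF pessoas + 2) ^ (pvR pessoas (pvIdx pessoas c)) := by
    intro d
    induction d with
    | zero => intro c _ _ hd; have := pvR_pos pessoas (pvIdx pessoas c); omega
    | succ d ih =>
      intro c hm hg hd
      have he := pvLookup_of_idx_lt pessoas c hg
      set e := (pessoas[pvIdx pessoas c]'hg).2 with hedef
      by_cases hz : e.1 = 0
      · rw [pvDfs_zero pessoas c e he hz]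
        simpa using Nat.one_le_pow _ _ (by omega)
      · have step := pvFriend_step pessoas RS hcl hlt hac c hm hg e he hz
        rw [pvDfs_cons pessoas RS hcl hlt hac c hm hg e he hz]
        set k := pvR pessoas (pvIdx pessoas c) with hk
        have hk1 : 1 ≤ k := pvR_pos pessoas (pvIdx pessoas c)
        set X := (pvMaxF pessoas + 2) ^ (k - 1) with hX
        have hX1 : 1 ≤ X := Nat.one_le_pow _ _ (by omega)
        have hsum : ((e.2.flatMap (pvDfs pessoas)).length) ≤ e.2.length * X := by
          rw [List.length_flatMap]
          calc (e.2.map fun f => (pvDfs pessoas f).length).sum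
              ≤ (e.2.map fun f => (pvDfs pessoas f).length).length • X := by
                apply List.sum_le_card_nsmul
                intro x hx
                obtain ⟨f, hf, rfl⟩ := List.mem_map.mp hx
                obtain ⟨hfm, hfl, hfr⟩ := step f hf
                calc (pvDfs pessoas f).length
                    ≤ (pvMaxF pessoas + 2) ^ (pvR pessoas (pvIdx pessoas f)) :=
                      ih f hfm hfl (by omega)
                  _ ≤ X := Nat.pow_le_pow_right (by omega) (by omega)
            _ = e.2.length * X := by simp [List.length_map, smul_eq_mul]
        have hM : e.2.length ≤ pvMaxF pessoas := by
          have hmem : pessoas[pvIdx pessoas c]'hg ∈ pessoas := List.getElem_mem hg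
          simpa [← hedef] using pvMaxF_bound pessoas _ hmem
        have hpow : (pvMaxF pessoas + 2) ^ k = (pvMaxF pessoas + 2) ^ (k - 1) * (pvMaxF pessoas + 2) := by
          conv_lhs => rw [show k = (k - 1) + 1 by omega]
          rw [pow_succ]
        calc (c :: e.2.flatMap (pvDfs pessoas)).length
            = 1 + (e.2.flatMap (pvDfs pessoas)).length := by simp [Nat.add_comm]
          _ ≤ 1 + e.2.length * X := by omega
          _ ≤ X + pvMaxF pessoas * X := by
              have : e.2.length * X ≤ pvMaxF pessoas * X := Nat.mul_le_mul_right X hM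
              omega
          _ = (pvMaxF pessoas + 1) * X := by ring
          _ ≤ (pvMaxF pessoas + 2) * X := Nat.mul_le_mul_right X (by omega)
          _ = (pvMaxF pessoas + 2) ^ k := by rw [hpow]; ring
  exact fun c hm hg => main (pvR pessoas (pvIdx pessoas c)) c hm hg (le_refl _)

theorem pvDfs_pos (pessoas : List (Int × Int × List Int)) (RS : List Nat)
    (hcl : ∀ i ∈ RS, ∀ j ∈ pvSuccs pessoas i, j ∈ RS)
    (hlt : ∀ i ∈ RS, ∀ j ∈ pvSuccs pessoas i, j < pessoas.length)
    (hac : ∀ i ∈ RS, i ∉ pvClosure pessoas (pvK pessoas) (pvSuccs pessoas i))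
    (c : Int) (hm : pvIdx pessoas c ∈ RS) (hg : pvIdx pessoas c < pessoas.length) :
    1 ≤ (pvDfs pessoas c).length := by
  have he := pvLookup_of_idx_lt pessoas c hg
  by_cases hz : (pessoas[pvIdx pessoas c]'hg).2.1 = 0
  · rw [pvDfs_zero pessoas c _ he hz]; simp
  · rw [pvDfs_cons pessoas RS hcl hlt hac c hm hg _ he hz]; simp

-- main invariant: with fuel at least the total output size, the stack loop flushes the stack
theorem pvBLoop_flush (pessoas : List (Int × Int × List Int)) (RS : List Nat)
    (hcl : ∀ i ∈ RS, ∀ j ∈ pvSuccs pessoas i, j ∈ RS)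
    (hlt : ∀ i ∈ RS, ∀ j ∈ pvSuccs pessoas i, j < pessoas.length)
    (hac : ∀ i ∈ RS, i ∉ pvClosure pessoas (pvK pessoas) (pvSuccs pessoas i)) :
    ∀ n stack acc,
      (∀ s ∈ stack, pvIdx pessoas s ∈ RS ∧ pvIdx pessoas s < pessoas.length) →
      (stack.map (fun s => (pvDfs pessoas s).length)).sum ≤ n →
      pvBLoop pessoas n stack acc = acc ++ stack.flatMap (pvDfs pessoas) := by
  intro n
  induction n with
  | zero =>
    intro stack acc hgood hsum
    cases stack with
    | nil => simp [pvBLoop]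
    | cons c rest =>
      exfalso
      obtain ⟨hm, hg⟩ := hgood c (by simp)
      have := pvDfs_pos pessoas RS hcl hlt hac c hm hg
      simp only [List.map_cons, List.sum_cons, Nat.le_zero] at hsum
      omega
  | succ n ih =>
    intro stack acc hgood hsum
    cases stack with
    | nil => simp [pvBLoop]
    | cons c rest =>
      obtain ⟨hm, hg⟩ := hgood c (by simp)
      have he := pvLookup_of_idx_lt pessoas c hg
      set e := (pessoas[pvIdx pessoas c]'hg).2 with hedef
      by_cases hz : e.1 = 0
      · have hdz := pvDfs_zero pessoas c e he hz
        simp only [pvBLoop, he, hz, if_true]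
        rw [ih rest (acc ++ [c]) (fun s hs => hgood s (by simp [hs])) (by
          simp only [List.map_cons, List.sum_cons, hdz, List.length_singleton] at hsum
          omega)]
        simp [List.flatMap_cons, hdz]
      · have hdc := pvDfs_cons pessoas RS hcl hlt hac c hm hg e he hz
        have step := pvFriend_step pessoas RS hcl hlt hac c hm hg e he hz
        simp only [pvBLoop, he, hz, if_false]
        rw [ih (e.2 ++ rest) (acc ++ [c])
            (by
              intro s hs
              rcases List.mem_append.mp hs with hs | hs
              · exact ⟨(step s hs).1, (step s hs).2.1⟩
              · exact hgood s (by simp [hs]))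
            (by
              have hlen : (pvDfs pessoas c).length
                  = 1 + ((e.2.map fun s => (pvDfs pessoas s).length).sum) := by
                rw [hdc]; simp [List.length_flatMap, Nat.add_comm]
              simp only [List.map_cons, List.sum_cons] at hsum
              simp only [List.map_append, List.sum_append]
              omega)]
        simp [List.flatMap_cons, List.flatMap_append, hdc]

-- ===== VERDICT (by name: the statement is the Claim_ definition above) =====
theorem atingidos_por_fake_news_spec : Claim_equal_atingidos_por_fake_news := by
  intro pessoas c _dom pre
  obtain ⟨hg, hpre⟩ := pre
  unfold Spec_atingidos_por_fake_news
  set RS := pvReachFrom pessoas (pvIdx pessoas c) with hRS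
  have hle : ∀ x ∈ ([pvIdx pessoas c] : List Nat), x ≤ pessoas.length := by
    simpa using Nat.le_of_lt hg
  have hclosed : ∀ x ∈ pvStep pessoas RS, x ∈ RS := pvClosure_closed pessoas _ hle
  have hcl : ∀ i ∈ RS, ∀ j ∈ pvSuccs pessoas i, j ∈ RS := by
    intro i hi j hj
    exact hclosed j ((pvMem_step pessoas RS j).mpr (Or.inr ⟨i, hi, hj⟩))
  have hlt : ∀ i ∈ RS, ∀ j ∈ pvSuccs pessoas i, j < pessoas.length :=
    fun i hi => (hpre i hi).1
  have hac : ∀ i ∈ RS, i ∉ pvClosure pessoas (pvK pessoas) (pvSuccs pessoas i) :=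
    fun i hi => (hpre i hi).2
  have hm : pvIdx pessoas c ∈ RS := pvSubset_closure pessoas _ _ _ (by simp)
  have hflush := pvBLoop_flush pessoas RS hcl hlt hac (pvFuelB pessoas) [c] []
    (by intro s hs; simp only [List.mem_singleton] at hs; subst hs; exact ⟨hm, hg⟩)
    (by
      simp only [List.map_cons, List.map_nil, List.sum_cons, List.sum_nil, Nat.add_zero]
      calc (pvDfs pessoas c).length
          ≤ (pvMaxF pessoas + 2) ^ (pvR pessoas (pvIdx pessoas c)) :=
            pvDfs_len_bound pessoas RS hcl hlt hac c hm hg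
        _ ≤ (pvMaxF pessoas + 2) ^ (pessoas.length + 2) :=
            Nat.pow_le_pow_right (by omega)
              (by have := pvR_le pessoas (pvIdx pessoas c) (Nat.le_of_lt hg); omega)
        _ = pvFuelB pessoas := rfl)
  show atingidos_por_fake_news pessoas c = atingidos_por_fake_news_alt pessoas c
  rw [show atingidos_por_fake_news_alt pessoas c = pvBLoop pessoas (pvFuelB pessoas) [c] [] from rfl,
      hflush]
  simp [pvDfs]
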